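-- pv_equiv track=rewrite | github.com/jsullivanphillips/Cantec-Internal-Tools | app/services/scheduling_service.py | subtract_busy_intervals
-- ===== SOURCE A (Python) =====
-- def subtract_busy_intervals(working_start, working_end, busy_intervals):
--     """
--     Clip each busy interval to the working period and subtract them to produce free intervals.
--     """
--     clipped_intervals = []
--     for s, e in busy_intervals:
--         cs = max(s, working_start)
--         ce = min(e, working_end)
--         if cs < ce:
--             clipped_intervals.append((cs, ce))
--     clipped_intervals.sort(key=lambda interval: interval[0])
--     free_intervals = []
--     current = working_start
--     for bstart, bend in clipped_intervals:
--         if bstart > current: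
--             free_intervals.append((current, bstart))
--         if bend > current:
--             current = bend
--     if current < working_end:
--         free_intervals.append((current, working_end))
--     return free_intervals
-- ===== SOURCE B (Python) =====
-- def subtract_busy_intervals(working_start, working_end, busy_intervals):
--     """Subtract each busy interval directly from the running list of free
--     intervals (interval splitting), with no clipping pass and no sort."""
--     free = [(working_start, working_end)] if working_start < working_end else []
--     for s, e in busy_intervals:
--         if s >= e:
--             continue
--         updated = []
--         for fs, fe in free:
--             if e <= fs or fe <= s:
--                 updated.append((fs, fe))
--             else:
--                 if fs < s:
--                     updated.append((fs, s))
--                 if e < fe: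
--                     updated.append((e, fe))
--         free = updated
--     return free
-- ===== Notes on version B (the rewrite author's own statement) =====
-- stated objective: alternative
-- what changed: Replaces A's clip-sort-sweep (clip every busy interval to the window, sort by start, sweep a 'current' pointer emitting gaps) with sortless interval splitting: start from the whole working window and subtract each busy interval in given order by splitting the affected free intervals.
import Mathlib
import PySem

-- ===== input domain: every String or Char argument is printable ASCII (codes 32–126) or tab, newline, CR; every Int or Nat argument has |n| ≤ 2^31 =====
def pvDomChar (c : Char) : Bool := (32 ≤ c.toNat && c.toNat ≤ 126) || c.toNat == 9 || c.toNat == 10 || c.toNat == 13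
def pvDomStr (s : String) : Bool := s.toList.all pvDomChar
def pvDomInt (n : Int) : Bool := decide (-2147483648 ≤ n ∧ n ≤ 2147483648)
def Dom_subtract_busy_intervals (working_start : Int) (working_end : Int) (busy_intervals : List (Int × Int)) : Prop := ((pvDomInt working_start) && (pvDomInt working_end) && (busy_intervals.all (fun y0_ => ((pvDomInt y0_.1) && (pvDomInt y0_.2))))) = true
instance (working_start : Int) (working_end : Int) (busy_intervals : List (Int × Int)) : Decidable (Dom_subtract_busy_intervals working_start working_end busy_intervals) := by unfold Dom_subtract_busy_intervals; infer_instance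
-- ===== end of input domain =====

-- B replaces A's clip-sort-sweep with sortless interval splitting: subtract each
-- busy interval directly from the running list of free intervals (alternative
-- decomposition, not claimed faster).

-- ===== PORT A =====
def subtract_busy_intervals (working_start : Int) (working_end : Int) (busy_intervals : List (Int × Int)) : List (Int × Int) :=
  let clipped := busy_intervals.foldl (fun acc p =>
    let cs := max p.1 working_start
    let ce := min p.2 working_end
    if cs < ce then acc ++ [(cs, ce)] else acc) []
  let sortedL := PySem.List.sorted clipped (fun interval => interval.1) false
  let st := sortedL.foldl (fun (st : List (Int × Int) × Int) p =>
    let st1 := if p.1 > st.2 then (st.1 ++ [(st.2, p.1)], st.2) else st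
    if p.2 > st1.2 then (st1.1, p.2) else st1) ([], working_start)
  if st.2 < working_end then st.1 ++ [(st.2, working_end)] else st.1

-- ===== PORT B =====
-- one busy interval (s,e) subtracted from one free interval f (the inner-loop body of Source B)
def pvSubPieces (s e : Int) (f : Int × Int) : List (Int × Int) :=
  if e ≤ f.1 ∨ f.2 ≤ s then [f]
  else (if f.1 < s then [(f.1, s)] else []) ++ (if e < f.2 then [(e, f.2)] else [])

def subtract_busy_intervals_alt (working_start : Int) (working_end : Int) (busy_intervals : List (Int × Int)) : List (Int × Int) :=
  let init := if working_start < working_end then [(working_start, working_end)] else []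
  busy_intervals.foldl (fun free p =>
    if p.1 ≥ p.2 then free
    else free.foldl (fun acc f => acc ++ pvSubPieces p.1 p.2 f) []) init

-- ===== PRECONDITION & SPEC =====
def Spec_subtract_busy_intervals (working_start : Int) (working_end : Int) (busy_intervals : List (Int × Int)) (out : List (Int × Int)) : Prop := out = subtract_busy_intervals_alt working_start working_end busy_intervals
instance (working_start : Int) (working_end : Int) (busy_intervals : List (Int × Int)) (out : List (Int × Int)) : Decidable (Spec_subtract_busy_intervals working_start working_end busy_intervals out) := by unfold Spec_subtract_busy_intervals; infer_instance

-- ===== CLAIM (what is proved, stated in full; the proofs are below) =====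
def Claim_equal_subtract_busy_intervals : Prop := ∀ (working_start : Int) (working_end : Int) (busy_intervals : List (Int × Int)), Dom_subtract_busy_intervals working_start working_end busy_intervals → Spec_subtract_busy_intervals working_start working_end busy_intervals (subtract_busy_intervals working_start working_end busy_intervals)

-- ===== LEMMAS AND PROOFS =====
-- Both programs are proved to return the canonical decomposition (pvCanon) of
-- the same point set (pvFreePt); pvCanon_unique then gives list equality.

-- x lies in some half-open interval of l
def pvCovers (l : List (Int × Int)) (x : Int) : Prop := ∃ p ∈ l, p.1 ≤ x ∧ x < p.2

-- canonical gap decomposition: strictly separated, positive-length intervals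
def pvCanon (l : List (Int × Int)) : Prop :=
  l.Pairwise (fun p q => p.2 < q.1) ∧ ∀ p ∈ l, p.1 < p.2

-- the intended point set: inside the window and in no busy interval
def pvFreePt (ws we : Int) (busy : List (Int × Int)) (x : Int) : Prop :=
  ws ≤ x ∧ x < we ∧ ∀ p ∈ busy, ¬ (p.1 ≤ x ∧ x < p.2)

-- A's sweep loop, as a structural recursion (related to the port's foldl in pvFoldA)
def pvSweep (we : Int) : Int → List (Int × Int) → List (Int × Int)
  | c, [] => if c < we then [(c, we)] else []
  | c, p :: t => (if p.1 > c then [(c, p.1)] else []) ++ pvSweep we (if p.2 > c then p.2 else c) t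

theorem pvFoldA (we : Int) (l : List (Int × Int)) (acc : List (Int × Int)) (c : Int) :
    (if (l.foldl (fun (st : List (Int × Int) × Int) p =>
      let st1 := if p.1 > st.2 then (st.1 ++ [(st.2, p.1)], st.2) else st
      if p.2 > st1.2 then (st1.1, p.2) else st1) (acc, c)).2 < we
     then (l.foldl (fun (st : List (Int × Int) × Int) p =>
      let st1 := if p.1 > st.2 then (st.1 ++ [(st.2, p.1)], st.2) else st
      if p.2 > st1.2 then (st1.1, p.2) else st1) (acc, c)).1 ++ [((l.foldl (fun (st : List (Int × Int) × Int) p =>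
      let st1 := if p.1 > st.2 then (st.1 ++ [(st.2, p.1)], st.2) else st
      if p.2 > st1.2 then (st1.1, p.2) else st1) (acc, c)).2, we)]
     else (l.foldl (fun (st : List (Int × Int) × Int) p =>
      let st1 := if p.1 > st.2 then (st.1 ++ [(st.2, p.1)], st.2) else st
      if p.2 > st1.2 then (st1.1, p.2) else st1) (acc, c)).1) = acc ++ pvSweep we c l := by
  induction l generalizing acc c with
  | nil => simp only [List.foldl_nil, pvSweep]; split <;> simp
  | cons p t ih =>
    simp only [List.foldl_cons, pvSweep]
    by_cases h1 : p.1 > c <;> by_cases h2 : p.2 > c <;>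
      simp only [h1, h2, if_pos, if_neg, ite_true, ite_false, not_lt] <;>
      rw [← ih] <;> simp_all <;> omega

theorem pvSweep_start (we c : Int) (l : List (Int × Int)) :
    ∀ p ∈ pvSweep we c l, c ≤ p.1 := by
  induction l generalizing c with
  | nil => intro p hp; simp only [pvSweep] at hp; split at hp <;> simp_all
  | cons q t ih =>
    intro p hp
    simp only [pvSweep, List.mem_append] at hp
    rcases hp with hp | hp
    · split at hp <;> simp_all
    · have := ih _ _ hp; split at this <;> omega

theorem pvSweep_canon (we c : Int) (l : List (Int × Int))
    (hb : ∀ p ∈ l, p.1 < p.2 ∧ p.2 ≤ we) : pvCanon (pvSweep we c l) := by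
  induction l generalizing c with
  | nil =>
    constructor
    · simp only [pvSweep]; split <;> simp
    · intro p hp; simp only [pvSweep] at hp; split at hp <;> simp_all
  | cons q t ih =>
    obtain ⟨hq, hqe⟩ := hb q (by simp)
    have hbt : ∀ p ∈ t, p.1 < p.2 ∧ p.2 ≤ we := fun p hp => hb p (by simp [hp])
    obtain ⟨ihp, ihpos⟩ := ih (if q.2 > c then q.2 else c) hbt
    constructor
    · simp only [pvSweep]
      rw [List.pairwise_append]
      refine ⟨?_, ihp, ?_⟩
      · split <;> simp
      · intro a ha b hb'
        have hstart := pvSweep_start we (if q.2 > c then q.2 else c) t b hb'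
        split at ha <;> simp_all <;> omega
    · intro p hp
      simp only [pvSweep, List.mem_append] at hp
      rcases hp with hp | hp
      · split at hp <;> simp_all
      · exact ihpos p hp

theorem pvSweep_covers (we c : Int) (l : List (Int × Int))
    (hs : l.Pairwise (fun p q => p.1 ≤ q.1)) (hb : ∀ p ∈ l, p.1 < p.2 ∧ p.2 ≤ we) (x : Int) :
    pvCovers (pvSweep we c l) x ↔ (c ≤ x ∧ x < we ∧ ∀ p ∈ l, ¬ (p.1 ≤ x ∧ x < p.2)) := by
  induction l generalizing c with
  | nil =>
    simp only [pvSweep, pvCovers]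
    split <;> simp_all <;> omega
  | cons q t ih =>
    obtain ⟨hq, hqe⟩ := hb q (by simp)
    have hbt : ∀ p ∈ t, p.1 < p.2 ∧ p.2 ≤ we := fun p hp => hb p (by simp [hp])
    have hst : t.Pairwise (fun p q => p.1 ≤ q.1) := hs.of_cons
    have hqt : ∀ p ∈ t, q.1 ≤ p.1 := fun p hp => (List.pairwise_cons.mp hs).1 p hp
    have hmax : (if q.2 > c then q.2 else c) = max c q.2 := by split <;> omega
    have ihx := ih (max c q.2) hst hbt
    simp only [pvSweep, pvCovers, List.mem_append, hmax] at *
    constructor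
    · rintro ⟨p, hp, hx⟩
      rcases hp with hp | hp
      · by_cases h1 : q.1 > c
        · rw [if_pos h1, List.mem_singleton] at hp
          subst hp
          refine ⟨hx.1, by omega, ?_⟩
          intro r hr
          rcases List.mem_cons.mp hr with rfl | hr
          · omega
          · have := hqt r hr; omega
        · rw [if_neg h1] at hp; simp at hp
      · have h2 := ihx.mp ⟨p, hp, hx⟩
        refine ⟨by omega, h2.2.1, ?_⟩
        intro r hr
        rcases List.mem_cons.mp hr with rfl | hr
        · omega
        · exact h2.2.2 r hr
    · rintro ⟨hcx, hxw, hnone⟩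
      have hnq := hnone q (List.mem_cons_self)
      by_cases hlt : x < q.1
      · have h1 : q.1 > c := by omega
        exact ⟨(c, q.1), Or.inl (by simp [h1]), by simp; omega⟩
      · obtain ⟨p, hp, hx⟩ := ihx.mpr ⟨by omega, hxw, fun r hr => hnone r (List.mem_cons_of_mem _ hr)⟩
        exact ⟨p, Or.inr hp, hx⟩

theorem pvCanon_unique (l1 l2 : List (Int × Int)) (h1 : pvCanon l1) (h2 : pvCanon l2)
    (h : ∀ x, pvCovers l1 x ↔ pvCovers l2 x) : l1 = l2 := by
  induction l1 generalizing l2 with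
  | nil =>
    cases l2 with
    | nil => rfl
    | cons b t2 =>
      exfalso
      have hb := h2.2 b List.mem_cons_self
      have := (h b.1).mpr ⟨b, List.mem_cons_self, le_refl _, hb⟩
      simp [pvCovers] at this
  | cons a t1 ih =>
    cases l2 with
    | nil =>
      exfalso
      have ha := h1.2 a List.mem_cons_self
      have := (h a.1).mp ⟨a, List.mem_cons_self, le_refl _, ha⟩
      simp [pvCovers] at this
    | cons b t2 =>
      have ha := h1.2 a List.mem_cons_self
      have hb := h2.2 b List.mem_cons_self
      have ht1 : ∀ q ∈ t1, a.2 < q.1 := (List.pairwise_cons.mp h1.1).1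
      have ht2 : ∀ q ∈ t2, b.2 < q.1 := (List.pairwise_cons.mp h2.1).1
      have c1 : pvCanon t1 := ⟨(List.pairwise_cons.mp h1.1).2, fun p hp => h1.2 p (List.mem_cons_of_mem _ hp)⟩
      have c2 : pvCanon t2 := ⟨(List.pairwise_cons.mp h2.1).2, fun p hp => h2.2 p (List.mem_cons_of_mem _ hp)⟩
      have hab1 : b.1 ≤ a.1 := by
        obtain ⟨p, hp, hx⟩ := (h a.1).mp ⟨a, List.mem_cons_self, le_refl _, ha⟩
        rcases List.mem_cons.mp hp with rfl | hp
        · exact hx.1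
        · have := ht2 p hp; have := h2.2 p (List.mem_cons_of_mem _ hp); omega
      have hba1 : a.1 ≤ b.1 := by
        obtain ⟨p, hp, hx⟩ := (h b.1).mpr ⟨b, List.mem_cons_self, le_refl _, hb⟩
        rcases List.mem_cons.mp hp with rfl | hp
        · exact hx.1
        · have := ht1 p hp; have := h1.2 p (List.mem_cons_of_mem _ hp); omega
      have hab2 : a.2 = b.2 := by
        by_contra hne
        rcases lt_or_gt_of_ne hne with hlt | hgt
        · obtain ⟨p, hp, hx⟩ := (h a.2).mpr ⟨b, List.mem_cons_self, by omega, by omega⟩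
          rcases List.mem_cons.mp hp with rfl | hp
          · omega
          · have := ht1 p hp; omega
        · obtain ⟨p, hp, hx⟩ := (h b.2).mp ⟨a, List.mem_cons_self, by omega, by omega⟩
          rcases List.mem_cons.mp hp with rfl | hp
          · omega
          · have := ht2 p hp; omega
      have hab : a = b := Prod.ext (by omega) hab2
      subst hab
      have htl : t1 = t2 := by
        apply ih t2 c1 c2
        intro x
        constructor
        · rintro ⟨p, hp, hx⟩
          have hpa := ht1 p hp
          obtain ⟨r, hr, hx'⟩ := (h x).mp ⟨p, List.mem_cons_of_mem _ hp, hx⟩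
          rcases List.mem_cons.mp hr with rfl | hr
          · omega
          · exact ⟨r, hr, hx'⟩
        · rintro ⟨p, hp, hx⟩
          have hpa := ht2 p hp
          obtain ⟨r, hr, hx'⟩ := (h x).mpr ⟨p, List.mem_cons_of_mem _ hp, hx⟩
          rcases List.mem_cons.mp hr with rfl | hr
          · omega
          · exact ⟨r, hr, hx'⟩
      rw [htl]

theorem pvPieces_covers (s e : Int) (hse : s < e) (f : Int × Int) (x : Int) :
    pvCovers (pvSubPieces s e f) x ↔ (f.1 ≤ x ∧ x < f.2 ∧ ¬ (s ≤ x ∧ x < e)) := by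
  unfold pvCovers pvSubPieces
  split_ifs with h1 h2 h3 h3 <;> simp_all <;> omega

theorem pvPieces_bounds (s e : Int) (f : Int × Int) (hf : f.1 < f.2)
    (q : Int × Int) (hq : q ∈ pvSubPieces s e f) : f.1 ≤ q.1 ∧ q.1 < q.2 ∧ q.2 ≤ f.2 := by
  unfold pvSubPieces at hq
  by_cases h1 : e ≤ f.1 ∨ f.2 ≤ s
  · rw [if_pos h1, List.mem_singleton] at hq; subst hq; omega
  · rw [if_neg h1] at hq
    push Not at h1
    rcases List.mem_append.mp hq with hq | hq
    · by_cases h2 : f.1 < s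
      · rw [if_pos h2, List.mem_singleton] at hq; subst hq
        refine ⟨le_refl _, h2, by omega⟩
      · rw [if_neg h2] at hq; simp at hq
    · by_cases h3 : e < f.2
      · rw [if_pos h3, List.mem_singleton] at hq; subst hq
        exact ⟨by omega, h3, le_refl _⟩
      · rw [if_neg h3] at hq; simp at hq

theorem pvSubOne_canon (s e : Int) (hse : s < e) (free : List (Int × Int)) (hc : pvCanon free) :
    pvCanon (free.flatMap (pvSubPieces s e)) := by
  induction free with
  | nil => simp [pvCanon]
  | cons f t ih =>
    have hf := hc.2 f List.mem_cons_self
    have hft : ∀ q ∈ t, f.2 < q.1 := (List.pairwise_cons.mp hc.1).1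
    have ct : pvCanon t := ⟨(List.pairwise_cons.mp hc.1).2, fun p hp => hc.2 p (List.mem_cons_of_mem _ hp)⟩
    obtain ⟨ihp, ihpos⟩ := ih ct
    rw [List.flatMap_cons]
    constructor
    · rw [List.pairwise_append]
      refine ⟨?_, ihp, ?_⟩
      · unfold pvSubPieces
        split_ifs <;> simp_all
      · intro p hp q hq
        obtain ⟨r, hr, hqr⟩ := List.mem_flatMap.mp hq
        have hp' := pvPieces_bounds s e f hf p hp
        have hq' := pvPieces_bounds s e r (ct.2 r hr) q hqr
        have := hft r hr
        omega
    · intro p hp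
      rcases List.mem_append.mp hp with hp | hp
      · exact (pvPieces_bounds s e f hf p hp).2.1
      · exact ihpos p hp

theorem pvFlat_covers (s e : Int) (hse : s < e) (free : List (Int × Int)) (x : Int) :
    pvCovers (free.flatMap (pvSubPieces s e)) x ↔ (pvCovers free x ∧ ¬ (s ≤ x ∧ x < e)) := by
  constructor
  · rintro ⟨q, hq, hx⟩
    obtain ⟨f, hf, hqf⟩ := List.mem_flatMap.mp hq
    have := (pvPieces_covers s e hse f x).mp ⟨q, hqf, hx⟩
    exact ⟨⟨f, hf, this.1, this.2.1⟩, this.2.2⟩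
  · rintro ⟨⟨f, hf, hx⟩, hout⟩
    obtain ⟨q, hq, hx'⟩ := (pvPieces_covers s e hse f x).mpr ⟨hx.1, hx.2, hout⟩
    exact ⟨q, List.mem_flatMap.mpr ⟨f, hf, hq⟩, hx'⟩

theorem pvA_char (ws we : Int) (busy : List (Int × Int)) :
    pvCanon (subtract_busy_intervals ws we busy) ∧
    ∀ x, pvCovers (subtract_busy_intervals ws we busy) x ↔ pvFreePt ws we busy x := by
  have hclip : (busy.foldl (fun acc p =>
      let cs := max p.1 ws
      let ce := min p.2 we
      if cs < ce then acc ++ [(cs, ce)] else acc) ([] : List (Int × Int)))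
      = (busy.filter (fun p => decide (max p.1 ws < min p.2 we))).map
          (fun p => (max p.1 ws, min p.2 we)) := by
    simpa using PySem.List.foldl_append_ite
      (p := fun p : Int × Int => max p.1 ws < min p.2 we)
      (f := fun p : Int × Int => (max p.1 ws, min p.2 we)) (l := busy) (acc := [])
  have hA : subtract_busy_intervals ws we busy
      = pvSweep we ws (PySem.List.sorted ((busy.filter (fun p => decide (max p.1 ws < min p.2 we))).map
          (fun p => (max p.1 ws, min p.2 we))) (fun interval => interval.1) false) := by
    unfold subtract_busy_intervals
    rw [hclip]
    simpa using pvFoldA we _ [] ws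
  set sortedL := PySem.List.sorted ((busy.filter (fun p => decide (max p.1 ws < min p.2 we))).map
          (fun p => (max p.1 ws, min p.2 we))) (fun interval => interval.1) false with hsl
  have hmemS : ∀ q, q ∈ sortedL ↔ ∃ p ∈ busy, max p.1 ws < min p.2 we ∧ q = (max p.1 ws, min p.2 we) := by
    intro q
    rw [hsl, PySem.List.mem_sorted, List.mem_map]
    constructor
    · rintro ⟨p, hpf, rfl⟩
      obtain ⟨hp, hc⟩ := List.mem_filter.mp hpf
      exact ⟨p, hp, of_decide_eq_true hc, rfl⟩
    · rintro ⟨p, hp, hc, rfl⟩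
      exact ⟨p, List.mem_filter.mpr ⟨hp, decide_eq_true hc⟩, rfl⟩
  have hb : ∀ q ∈ sortedL, q.1 < q.2 ∧ q.2 ≤ we := by
    intro q hq
    obtain ⟨p, _, hc, rfl⟩ := (hmemS q).mp hq
    constructor <;> simp <;> omega
  have hs : sortedL.Pairwise (fun p q => p.1 ≤ q.1) := by
    rw [hsl]; exact PySem.List.sorted_pairwise _ _
  rw [hA]
  refine ⟨pvSweep_canon we ws sortedL hb, fun x => ?_⟩
  rw [pvSweep_covers we ws sortedL hs hb x]
  unfold pvFreePt
  constructor
  · rintro ⟨h1, h2, h3⟩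
    refine ⟨h1, h2, fun p hp => ?_⟩
    rintro ⟨hp1, hp2⟩
    have hc : max p.1 ws < min p.2 we := by omega
    exact h3 (max p.1 ws, min p.2 we) ((hmemS _).mpr ⟨p, hp, hc, rfl⟩) (by constructor <;> simp <;> omega)
  · rintro ⟨h1, h2, h3⟩
    refine ⟨h1, h2, fun q hq => ?_⟩
    obtain ⟨p, hp, hc, rfl⟩ := (hmemS q).mp hq
    have := h3 p hp
    simp; omega

theorem pvB_fold (busy : List (Int × Int)) (free : List (Int × Int)) (hc : pvCanon free) :
    pvCanon (busy.foldl (fun free p =>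
      if p.1 ≥ p.2 then free
      else free.foldl (fun acc f => acc ++ pvSubPieces p.1 p.2 f) []) free) ∧
    ∀ x, pvCovers (busy.foldl (fun free p =>
      if p.1 ≥ p.2 then free
      else free.foldl (fun acc f => acc ++ pvSubPieces p.1 p.2 f) []) free) x
      ↔ (pvCovers free x ∧ ∀ p ∈ busy, ¬ (p.1 ≤ x ∧ x < p.2)) := by
  induction busy generalizing free with
  | nil => simp [hc]
  | cons p t ih =>
    rw [List.foldl_cons]
    by_cases hp : p.1 ≥ p.2
    · rw [if_pos hp]
      obtain ⟨ih1, ih2⟩ := ih free hc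
      refine ⟨ih1, fun x => (ih2 x).trans ?_⟩
      constructor
      · rintro ⟨h1, h2⟩
        exact ⟨h1, fun r hr => by rcases List.mem_cons.mp hr with rfl | hr; omega; exact h2 r hr⟩
      · rintro ⟨h1, h2⟩
        exact ⟨h1, fun r hr => h2 r (List.mem_cons_of_mem _ hr)⟩
    · rw [if_neg hp]
      have hse : p.1 < p.2 := by omega
      have hflat : free.foldl (fun acc f => acc ++ pvSubPieces p.1 p.2 f) []
          = free.flatMap (pvSubPieces p.1 p.2) := by
        simpa using PySem.List.foldl_append_eq_flatMap (g := pvSubPieces p.1 p.2) (l := free) (acc := [])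
      rw [hflat]
      obtain ⟨ih1, ih2⟩ := ih _ (pvSubOne_canon p.1 p.2 hse free hc)
      refine ⟨ih1, fun x => (ih2 x).trans ?_⟩
      rw [pvFlat_covers p.1 p.2 hse free x]
      constructor
      · rintro ⟨⟨h1, h0⟩, h2⟩
        exact ⟨h1, fun r hr => by rcases List.mem_cons.mp hr with rfl | hr; exact h0; exact h2 r hr⟩
      · rintro ⟨h1, h2⟩
        exact ⟨⟨h1, h2 p List.mem_cons_self⟩, fun r hr => h2 r (List.mem_cons_of_mem _ hr)⟩

theorem pvB_char (ws we : Int) (busy : List (Int × Int)) :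
    pvCanon (subtract_busy_intervals_alt ws we busy) ∧
    ∀ x, pvCovers (subtract_busy_intervals_alt ws we busy) x ↔ pvFreePt ws we busy x := by
  have hcinit : pvCanon (if ws < we then [(ws, we)] else []) := by
    split <;> simp [pvCanon] <;> omega
  have hcov : ∀ x, pvCovers (if ws < we then [(ws, we)] else []) x ↔ (ws ≤ x ∧ x < we) := by
    intro x; split <;> simp [pvCovers] <;> omega
  obtain ⟨h1, h2⟩ := pvB_fold busy _ hcinit
  unfold subtract_busy_intervals_alt
  refine ⟨h1, fun x => (h2 x).trans ?_⟩
  rw [hcov x]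
  unfold pvFreePt
  constructor
  · rintro ⟨⟨a, b⟩, c⟩; exact ⟨a, b, c⟩
  · rintro ⟨a, b, c⟩; exact ⟨⟨a, b⟩, c⟩

-- ===== VERDICT (by name: the statement is the Claim_ definition above) =====
theorem subtract_busy_intervals_spec : Claim_equal_subtract_busy_intervals := by
  intro ws we busy _
  unfold Spec_subtract_busy_intervals
  exact pvCanon_unique _ _ (pvA_char ws we busy).1 (pvB_char ws we busy).1
    (fun x => ((pvA_char ws we busy).2 x).trans ((pvB_char ws we busy).2 x).symm)
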